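-- pv_equiv track=rewrite | github.com/UHM-PANDA/Mock-Interview-Historical | Fall 2020/Week_11/03_Sock_merchant_problem/Python/main.py | sockMerchantTime
-- ===== SOURCE A (Python) =====
-- def sockMerchantTime(arr):
--   hashTable = {}
--   for i in arr:
--     if not i in hashTable:
--       hashTable[i] = 1
--     else:
--       hashTable[i] += 1
--   pairs = 0
--   for i, elem in hashTable.items():
--     pairs += elem//2
--   return pairs
-- ===== SOURCE B (Python) =====
-- def sockMerchantTime(arr):
--   s = sorted(arr)
--   pairs = 0
--   i = 0
--   while i + 1 < len(s):
--     if s[i] == s[i + 1]: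
--       pairs += 1
--       i += 2
--     else:
--       i += 1
--   return pairs
-- ===== Notes on version B (the rewrite author's own statement) =====
-- stated objective: alternative
-- what changed: Replaces the hash-table frequency count plus a sum of count//2 with sorting a copy of the list and one adjacent-pair scan that pairs equal neighbours.
import Mathlib
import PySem

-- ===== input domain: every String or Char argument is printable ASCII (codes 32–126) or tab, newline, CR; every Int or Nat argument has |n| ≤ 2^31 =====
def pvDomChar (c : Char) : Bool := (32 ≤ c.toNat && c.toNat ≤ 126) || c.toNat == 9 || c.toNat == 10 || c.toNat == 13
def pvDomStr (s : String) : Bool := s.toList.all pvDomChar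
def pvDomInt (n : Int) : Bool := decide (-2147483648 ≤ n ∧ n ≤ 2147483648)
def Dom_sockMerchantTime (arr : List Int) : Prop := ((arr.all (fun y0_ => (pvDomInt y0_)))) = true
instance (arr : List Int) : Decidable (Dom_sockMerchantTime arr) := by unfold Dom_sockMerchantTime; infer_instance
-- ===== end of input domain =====

-- B replaces A's hash-table count (sum of count//2) with sorting a copy and one adjacent-pair scan; alternative algorithm, not claimed faster.


-- ===== PORT A =====
-- literal port: build the frequency dict, then sum elem // 2 over its items
def sockMerchantTime (arr : List Int) : Int :=
  let hashTable : PySem.Dict Int Int :=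
    arr.foldl (fun d i =>
      if !(d.contains i) then d.insert i 1 else d.insert i (d.getD i 0 + 1))
      PySem.Dict.empty
  hashTable.items.foldl (fun pairs p => pairs + PySem.Int.floordiv p.2 2) 0

-- ===== PORT B =====
-- the while loop of Source B: walk the sorted list, pairing equal neighbours
-- (advance by 2 on a pair, by 1 otherwise), with `pairs` as accumulator
def pvPairScan (pairs : Int) : List Int → Int
  | x :: y :: rest => if x == y then pvPairScan (pairs + 1) rest else pvPairScan pairs (y :: rest)
  | _ => pairs
  termination_by l => l.length
  decreasing_by all_goals simp

def sockMerchantTime_alt (arr : List Int) : Int :=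
  pvPairScan 0 (PySem.List.sorted arr (fun x => x) false)

-- ===== PRECONDITION & SPEC =====
def Spec_sockMerchantTime (arr : List Int) (out : Int) : Prop := out = sockMerchantTime_alt arr
instance (arr : List Int) (out : Int) : Decidable (Spec_sockMerchantTime arr out) := by unfold Spec_sockMerchantTime; infer_instance

-- ===== CLAIM (what is proved, stated in full; the proofs are below) =====
def Claim_equal_sockMerchantTime : Prop := ∀ (arr : List Int), Dom_sockMerchantTime arr → Spec_sockMerchantTime arr (sockMerchantTime arr)

-- ===== LEMMAS AND PROOFS =====

-- the scan accumulator shifts out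
theorem pvPairScan_shift : ∀ (l : List Int) (p : Int), pvPairScan p l = p + pvPairScan 0 l
  | [], p => by simp [pvPairScan]
  | [x], p => by simp [pvPairScan]
  | x :: y :: rest, p => by
      by_cases h : x = y
      · simp only [pvPairScan, h, BEq.rfl, if_true]
        rw [pvPairScan_shift rest (p + 1), pvPairScan_shift rest (0 + 1)]
        ring
      · simp only [pvPairScan, beq_iff_eq, h, if_false]
        exact pvPairScan_shift (y :: rest) p
  termination_by l _ => l.length
  decreasing_by all_goals simp

-- scanning a block of c equal elements followed by a block not containing x
theorem pvPairScan_replicate (c : Nat) (x : Int) (t : List Int) (hx : x ∉ t) :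
    pvPairScan 0 (List.replicate c x ++ t) = ((c / 2 : Nat) : Int) + pvPairScan 0 t := by
  induction c using Nat.strong_induction_on with
  | _ c ih =>
    match c with
    | 0 => simp
    | 1 =>
      cases t with
      | nil => simp [pvPairScan]
      | cons z t' =>
        have hz : x ≠ z := by
          intro h; exact hx (h ▸ List.mem_cons_self)
        simp [pvPairScan, hz]
    | (n + 2) =>
      have : List.replicate (n + 2) x ++ t = x :: x :: (List.replicate n x ++ t) := by
        simp [List.replicate_succ]
      rw [this]
      simp only [pvPairScan, BEq.rfl, if_true]
      rw [pvPairScan_shift, ih n (by omega)]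
      have : ((n + 2) / 2 : Nat) = (n / 2 : Nat) + 1 := by omega
      rw [this]
      push_cast
      ring

-- a sorted nonempty list is a block of copies of its head followed by a sorted tail avoiding the head
theorem pvPrefixRep : ∀ (t : List Int) (x : Int), (x :: t).Pairwise (· ≤ ·) →
    ∃ (c : Nat) (r : List Int), x :: t = List.replicate (c + 1) x ++ r ∧ x ∉ r ∧ r.Pairwise (· ≤ ·) := by
  intro t
  induction t with
  | nil => intro x _; exact ⟨0, [], by simp, by simp, by simp⟩
  | cons y t' ih =>
    intro x h
    have hxy : x ≤ y := (List.pairwise_cons.mp h).1 y List.mem_cons_self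
    have hyt : (y :: t').Pairwise (· ≤ ·) := (List.pairwise_cons.mp h).2
    by_cases hxe : x = y
    · have hxt : (x :: t').Pairwise (· ≤ ·) := by
        refine List.pairwise_cons.mpr ⟨?_, (List.pairwise_cons.mp hyt).2⟩
        intro z hz
        exact hxe ▸ (List.pairwise_cons.mp hyt).1 z hz
      obtain ⟨c, r, heq, hxr, hr⟩ := ih x hxt
      refine ⟨c + 1, r, ?_, hxr, hr⟩
      calc x :: y :: t' = x :: (x :: t') := by rw [hxe]
        _ = x :: (List.replicate (c + 1) x ++ r) := by rw [heq]
        _ = List.replicate (c + 2) x ++ r := by simp [List.replicate_succ]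
    · refine ⟨0, y :: t', by simp, ?_, hyt⟩
      intro hmem
      have hlt : x < y := lt_of_le_of_ne hxy hxe
      rcases List.mem_cons.mp hmem with h1 | h2
      · exact hxe h1
      · have := (List.pairwise_cons.mp hyt).1 x h2
        omega

-- Set.ofList helpers
theorem pvFoldlAddCons : ∀ (r s : List Int) (x : Int), x ∉ r →
    List.foldl PySem.Set.add (x :: s) r = x :: List.foldl PySem.Set.add s r := by
  intro r
  induction r with
  | nil => intro s x _; rfl
  | cons y r' ih =>
    intro s x hx
    have hxy : x ≠ y := fun h => hx (h ▸ List.mem_cons_self)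
    have hstep : PySem.Set.add (x :: s) y = x :: PySem.Set.add s y := by
      simp only [PySem.Set.add, PySem.Set.contains, List.contains_cons]
      have : (y == x) = false := by simp [hxy.symm]
      rw [this]
      simp only [Bool.false_or]
      by_cases hm : y ∈ s <;> simp [hm]
    simp only [List.foldl_cons, hstep]
    exact ih (PySem.Set.add s y) x (fun h => hx (List.mem_cons_of_mem y h))

theorem pvFoldlAddReplicate : ∀ (m : Nat) (s : List Int) (x : Int), x ∈ s →
    List.foldl PySem.Set.add s (List.replicate m x) = s := by
  intro m
  induction m with
  | zero => intro s x _; rfl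
  | succ n ih =>
    intro s x hx
    have : PySem.Set.add s x = s := by
      simp [PySem.Set.add, PySem.Set.contains, hx]
    simp [List.replicate_succ, this, ih s x hx]

theorem pvOfListBlock (c : Nat) (x : Int) (r : List Int) (hx : x ∉ r) :
    PySem.Set.ofList (List.replicate (c + 1) x ++ r) = x :: PySem.Set.ofList r := by
  simp only [PySem.Set.ofList, List.foldl_append]
  have h1 : List.foldl PySem.Set.add PySem.Set.empty (List.replicate (c + 1) x) = [x] := by
    rw [List.replicate_succ]
    simp only [List.foldl_cons]
    have : PySem.Set.add PySem.Set.empty x = [x] := rfl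
    rw [this]
    exact pvFoldlAddReplicate c [x] x List.mem_cons_self
  rw [h1]
  exact pvFoldlAddCons r [] x hx

-- the pair scan on a sorted list computes the sum of count k / 2 over the distinct values
theorem pvScanEqSum (s : List Int) (hs : s.Pairwise (· ≤ ·)) :
    pvPairScan 0 s = ((PySem.Set.ofList s).map (fun k => ((s.count k / 2 : Nat) : Int))).sum := by
  induction hn : s.length using Nat.strong_induction_on generalizing s with
  | _ n ih =>
    cases s with
    | nil => simp [pvPairScan, PySem.Set.ofList, PySem.Set.empty]
    | cons x t =>
      obtain ⟨c, r, heq, hxr, hr⟩ := pvPrefixRep t x hs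
      have hlen : r.length < n := by
        have h2 := congrArg List.length heq
        simp at h2 hn
        omega
      have hcountx : (x :: t).count x = c + 1 := by
        rw [heq]
        simp [List.count_append, List.count_eq_zero_of_not_mem hxr]
      have hcountk : ∀ k ∈ r, (x :: t).count k = r.count k := by
        intro k hk
        have hkx : k ≠ x := fun h => hxr (h ▸ hk)
        rw [heq, List.count_append, List.count_replicate]
        simp [Ne.symm hkx]
      have hscan : pvPairScan 0 (x :: t) = ((((c + 1) / 2 : Nat)) : Int) + pvPairScan 0 r := by
        rw [heq]; exact pvPairScan_replicate (c + 1) x r hxr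
      have hset : PySem.Set.ofList (x :: t) = x :: PySem.Set.ofList r := by
        rw [heq]; exact pvOfListBlock c x r hxr
      rw [hscan, ih r.length hlen r hr rfl, hset]
      simp only [List.map_cons, List.sum_cons, hcountx]
      congr 1
      apply congrArg
      apply List.map_congr_left
      intro k hk
      have hkr : k ∈ r := (PySem.Set.mem_ofList r k).mp hk
      rw [hcountk k hkr]

-- A computes the same sum over the distinct values of arr
theorem pvAEqSum (arr : List Int) :
    sockMerchantTime arr = ((PySem.Set.ofList arr).map (fun k => ((arr.count k / 2 : Nat) : Int))).sum := by
  have hfun : ∀ (acc : PySem.Dict Int Int), ∀ i ∈ arr,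
      (if !(acc.contains i) then acc.insert i 1 else acc.insert i (acc.getD i 0 + 1)) =
        acc.insert i (acc.getD i 0 + 1) := by
    intro acc i _
    by_cases hc : acc.contains i = true
    · simp [hc]
    · simp only [Bool.not_eq_true] at hc
      simp [hc, PySem.Dict.getD_of_not_contains acc 0 hc]
  unfold sockMerchantTime
  show List.foldl (fun pairs p => pairs + PySem.Int.floordiv p.2 2) 0
      ((List.foldl (fun d i => if !(d.contains i) then d.insert i 1 else d.insert i (d.getD i 0 + 1))
        PySem.Dict.empty arr).items) = _
  rw [PySem.List.foldl_congr_mem arr _ (fun d i => d.insert i (d.getD i 0 + 1)) PySem.Dict.empty hfun]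
  rw [PySem.Dict.foldl_insert_getD_add_one_eq_counter]
  simp only [PySem.List.foldl_add]
  rw [PySem.Dict.items_counter, List.map_map]
  rw [zero_add]
  apply congrArg
  apply List.map_congr_left
  intro k _
  show PySem.Int.floordiv ((arr.count k : Nat) : Int) 2 = ((arr.count k / 2 : Nat) : Int)
  exact_mod_cast PySem.Int.floordiv_natCast (arr.count k) 2

-- ===== VERDICT (by name: the statement is the Claim_ definition above) =====
theorem sockMerchantTime_spec : Claim_equal_sockMerchantTime := by
  intro arr _
  unfold Spec_sockMerchantTime sockMerchantTime_alt
  rw [pvAEqSum arr]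
  rw [pvScanEqSum (PySem.List.sorted arr (fun x => x) false) (PySem.List.sorted_pairwise arr (fun x => x))]
  have hperm : (PySem.List.sorted arr (fun x => x) false).Perm arr :=
    PySem.List.sorted_perm arr (fun x => x) false
  have hcount : ∀ k, (PySem.List.sorted arr (fun x => x) false).count k = arr.count k :=
    fun k => hperm.count_eq k
  have hsetperm : (PySem.Set.ofList (PySem.List.sorted arr (fun x => x) false)).Perm (PySem.Set.ofList arr) := by
    rw [List.perm_ext_iff_of_nodup (PySem.Set.nodup_ofList _) (PySem.Set.nodup_ofList _)]
    intro a
    rw [PySem.Set.mem_ofList, PySem.Set.mem_ofList]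
    exact hperm.mem_iff
  calc ((PySem.Set.ofList arr).map (fun k => ((arr.count k / 2 : Nat) : Int))).sum
      = ((PySem.Set.ofList (PySem.List.sorted arr (fun x => x) false)).map
          (fun k => ((arr.count k / 2 : Nat) : Int))).sum :=
        ((hsetperm.map _).sum_eq).symm
    _ = ((PySem.Set.ofList (PySem.List.sorted arr (fun x => x) false)).map
          (fun k => (((PySem.List.sorted arr (fun x => x) false).count k / 2 : Nat) : Int))).sum := by
        apply congrArg; apply List.map_congr_left; intro k _; rw [hcount k]
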